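-- pv_equiv track=rewrite | github.com/guruswarupa/visualdsa | public/sorting-algorithms/cyclesort/code.py | cycle_sort
-- ===== SOURCE A (Python) =====
-- def cycle_sort(arr):
--     writes = 0
--
--     # Loop through the array to find cycles to rotate.
--     for cycle_start in range(0, len(arr) - 1):
--         item = arr[cycle_start]
--
--         # Find where to put the item.
--         pos = cycle_start
--         for i in range(cycle_start + 1, len(arr)):
--             if arr[i] < item:
--                 pos += 1
--
--         # If the item is already there, this is not a cycle.
--         if pos == cycle_start:
--             continue
--
--         # Otherwise, put the item there or right after any duplicates.
--         while item == arr[pos]: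
--             pos += 1
--         arr[pos], item = item, arr[pos]
--         writes += 1
--
--         # Rotate the rest of the cycle.
--         while pos != cycle_start:
--             pos = cycle_start
--             for i in range(cycle_start + 1, len(arr)):
--                 if arr[i] < item:
--                     pos += 1
--
--             while item == arr[pos]:
--                 pos += 1
--             arr[pos], item = item, arr[pos]
--             writes += 1
--
--     return writes
--
-- arr = [3, 1, 5, 2, 4]
-- ===== SOURCE B (Python) =====
-- def cycle_sort(arr):
--     # Same result and same in-place sorting effect as A, via sort + mismatch count.
--     s = sorted(arr)
--     writes = sum(1 for x, y in zip(arr, s) if x != y)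
--     arr[:] = s
--     return writes
-- ===== Notes on version B (the rewrite author's own statement) =====
-- stated objective: faster
-- what changed: Replaces the quadratic cycle-following scans with one sort followed by a single pass counting positions whose value differs from the sorted array (cycle sort's write count equals the number of misplaced elements).
import Mathlib
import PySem

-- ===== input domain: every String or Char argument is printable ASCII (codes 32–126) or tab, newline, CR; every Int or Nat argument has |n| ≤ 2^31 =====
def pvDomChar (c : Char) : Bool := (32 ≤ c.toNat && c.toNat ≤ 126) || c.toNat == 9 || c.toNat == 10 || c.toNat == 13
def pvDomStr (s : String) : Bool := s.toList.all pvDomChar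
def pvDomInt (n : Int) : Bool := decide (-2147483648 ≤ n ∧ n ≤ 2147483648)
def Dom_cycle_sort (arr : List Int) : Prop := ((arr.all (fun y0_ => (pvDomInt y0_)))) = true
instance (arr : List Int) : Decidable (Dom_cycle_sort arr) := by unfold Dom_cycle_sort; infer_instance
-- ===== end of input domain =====

-- B replaces A's quadratic cycle-following with sort + one mismatch-counting pass
-- (equal return value; A sorts `arr` in place and B performs the same mutation in Python).

-- ===== PORT A =====
-- 'pos = cycle_start; for i in range(cycle_start+1, len(arr)): if arr[i] < item: pos += 1'
-- as a fold over the same elements arr[cycle_start+1:], same counter.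
def pvPosFold (tl : List Int) (item : Int) (pos : Nat) : Nat :=
  tl.foldl (fun p x => if x < item then p + 1 else p) pos

-- 'while item == arr[pos]: pos += 1'.  The bound pos < arr.length and the fuel only make
-- the loop total; Python maintains pos in range on every run that terminates.
def pvSkipEq (a : List Int) (item : Int) : Nat → Nat → Nat
  | 0, pos => pos
  | fuel+1, pos =>
    if pos < a.length ∧ a.getD pos 0 = item then pvSkipEq a item fuel (pos+1) else pos

-- 'while pos != cycle_start: …' (recompute pos, skip duplicates, swap, count the write);
-- fuel is only for totality: each write fixes one misplaced slot, so length+1 never runs out.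
def pvRotLoop (c : Nat) : Nat → List Int → Int → Int → Nat → (List Int × Int)
  | 0, a, _, w, _ => (a, w)
  | fuel+1, a, item, w, pos =>
    if pos = c then (a, w)
    else
      let pos' := pvSkipEq a item (a.length + 1) (pvPosFold (a.drop (c+1)) item c)
      let item' := a.getD pos' 0
      pvRotLoop c fuel (a.set pos' item) item' (w + 1) pos'

-- one iteration of the outer 'for cycle_start in range(0, len(arr) - 1)'
def pvCycleStep (st : List Int × Int) (c : Nat) : List Int × Int :=
  let a := st.1
  let item := a.getD c 0
  let pos := pvPosFold (a.drop (c+1)) item c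
  if pos = c then st
  else
    let pos' := pvSkipEq a item (a.length + 1) pos
    let item' := a.getD pos' 0
    pvRotLoop c (a.length + 1) (a.set pos' item) item' (st.2 + 1) pos'

def cycle_sort (arr : List Int) : Int :=
  ((List.range (arr.length - 1)).foldl pvCycleStep (arr, 0)).2

-- ===== PORT B =====
-- s = sorted(arr); writes = sum(1 for x, y in zip(arr, s) if x != y)
def cycle_sort_alt (arr : List Int) : Int :=
  let s := PySem.List.sorted arr (fun x => x) false
  (((arr.zip s).filter (fun p => decide (p.1 ≠ p.2))).length : Int)

-- ===== PRECONDITION & SPEC =====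
def Spec_cycle_sort (arr : List Int) (out : Int) : Prop := out = cycle_sort_alt arr
instance (arr : List Int) (out : Int) : Decidable (Spec_cycle_sort arr out) := by unfold Spec_cycle_sort; infer_instance

-- ===== CLAIM (what is proved, stated in full; the proofs are below) =====
def Claim_equal_cycle_sort : Prop := ∀ (arr : List Int), Dom_cycle_sort arr → Spec_cycle_sort arr (cycle_sort arr)

-- ===== LEMMAS AND PROOFS =====

-- number of positions where a and s disagree (componentwise, up to the shorter length)
def pvMsc : List Int → List Int → Nat
  | [], _ => 0
  | _ :: _, [] => 0
  | x :: xs, y :: ys => (if x ≠ y then 1 else 0) + pvMsc xs ys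

lemma pvMsc_zip (a s : List Int) :
    pvMsc a s = ((a.zip s).filter (fun p => decide (p.1 ≠ p.2))).length := by
  induction a generalizing s with
  | nil => cases s <;> simp [pvMsc]
  | cons x xs ih =>
    cases s with
    | nil => simp [pvMsc]
    | cons y ys =>
      by_cases h : x = y <;> simp [pvMsc, h, ih] <;> omega

lemma pvMsc_self (a : List Int) : pvMsc a a = 0 := by
  induction a with
  | nil => rfl
  | cons x xs ih => simp [pvMsc, ih]

lemma pvMsc_le_length (a s : List Int) : pvMsc a s ≤ a.length := by
  induction a generalizing s with
  | nil => cases s <;> simp [pvMsc]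
  | cons x xs ih =>
    cases s with
    | nil => simp [pvMsc]
    | cons y ys =>
      have := ih ys
      by_cases h : x = y <;> simp [pvMsc, h] <;> omega

lemma pvMsc_set (v : Int) : ∀ (p : Nat) (a s : List Int), p < a.length → p < s.length →
    s.getD p 0 = v → a.getD p 0 ≠ v → pvMsc (a.set p v) s + 1 = pvMsc a s := by
  intro p
  induction p with
  | zero =>
    intro a s ha hs hsv hav
    cases a with
    | nil => simp at ha
    | cons x xs =>
      cases s with
      | nil => simp at hs
      | cons y ys =>
        simp at hsv hav
        simp [pvMsc, hsv, hav]
        omega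
  | succ p ih =>
    intro a s ha hs hsv hav
    cases a with
    | nil => simp at ha
    | cons x xs =>
      cases s with
      | nil => simp at hs
      | cons y ys =>
        simp at ha hs hsv hav
        have := ih xs ys ha hs hsv hav
        simp [pvMsc]
        omega

-- getD helpers
lemma pvGetD_drop (a : List Int) : ∀ (m i : Nat), (a.drop m).getD i 0 = a.getD (m + i) 0 := by
  induction a with
  | nil => intro m i; simp
  | cons x xs ih =>
    intro m i
    cases m with
    | zero => simp
    | succ m => simpa [Nat.succ_add] using ih m i

lemma pvGetD_set_self (v : Int) : ∀ (p : Nat) (a : List Int), p < a.length →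
    (a.set p v).getD p 0 = v := by
  intro p
  induction p with
  | zero => intro a h; cases a with | nil => simp at h | cons x xs => simp
  | succ p ih =>
    intro a h
    cases a with
    | nil => simp at h
    | cons x xs => simp at h; simpa using ih xs h

lemma pvGetD_set_ne (v : Int) : ∀ (p q : Nat) (a : List Int), q ≠ p →
    (a.set p v).getD q 0 = a.getD q 0 := by
  intro p
  induction p with
  | zero =>
    intro q a h
    cases a with
    | nil => simp
    | cons x xs => cases q with | zero => omega | succ q => simp
  | succ p ih =>
    intro q a h
    cases a with
    | nil => simp
    | cons x xs =>
      cases q with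
      | zero => simp
      | succ q => simpa using ih q xs (by omega)

lemma pvDrop_set_ge (v : Int) : ∀ (m p : Nat) (a : List Int), m ≤ p →
    (a.set p v).drop m = (a.drop m).set (p - m) v := by
  intro m
  induction m with
  | zero => intro p a _; simp
  | succ m ih =>
    intro p a h
    cases a with
    | nil => simp
    | cons x xs =>
      cases p with
      | zero => omega
      | succ p => simpa [Nat.succ_sub_succ] using ih p xs (by omega)

lemma pvTake_set_ge (v : Int) : ∀ (m p : Nat) (a : List Int), m ≤ p →
    (a.set p v).take m = a.take m := by
  intro m
  induction m with
  | zero => intro p a _; simp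
  | succ m ih =>
    intro p a h
    cases a with
    | nil => simp
    | cons x xs =>
      cases p with
      | zero => omega
      | succ p => simpa using ih p xs (by omega)

lemma pvDrop_set_self (v : Int) : ∀ (c : Nat) (a : List Int), c < a.length →
    (a.set c v).drop c = v :: a.drop (c+1) := by
  intro c
  induction c with
  | zero => intro a h; cases a with | nil => simp at h | cons x xs => simp
  | succ c ih =>
    intro a h
    cases a with
    | nil => simp at h
    | cons x xs => simp at h; simpa using ih xs h

lemma pvDrop_eq_getD_cons : ∀ (c : Nat) (a : List Int), c < a.length →
    a.drop c = a.getD c 0 :: a.drop (c+1) := by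
  intro c
  induction c with
  | zero => intro a h; cases a with | nil => simp at h | cons x xs => simp
  | succ c ih =>
    intro a h
    cases a with
    | nil => simp at h
    | cons x xs => simp at h; simpa using ih xs h

lemma pvTake_succ_getD : ∀ (c : Nat) (a : List Int), c < a.length →
    a.take (c+1) = a.take c ++ [a.getD c 0] := by
  intro c
  induction c with
  | zero => intro a h; cases a with | nil => simp at h | cons x xs => simp
  | succ c ih =>
    intro a h
    cases a with
    | nil => simp at h
    | cons x xs => simp at h; simpa using ih xs h

lemma pvGetD_take (d : Int) : ∀ (k i : Nat) (a : List Int), i < k →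
    (a.take k).getD i d = a.getD i d := by
  intro k
  induction k with
  | zero => intro i a h; omega
  | succ k ih =>
    intro i a h
    cases a with
    | nil => simp
    | cons x xs =>
      cases i with
      | zero => simp
      | succ i => simpa using ih i xs (by omega)

-- l with l[q] replaced by v, plus the old l[q] on top, is a permutation of v on top of l
lemma pvPerm_cons_set (v : Int) : ∀ (q : Nat) (l : List Int), q < l.length →
    (l.getD q 0 :: l.set q v).Perm (v :: l) := by
  intro q
  induction q with
  | zero =>
    intro l h
    cases l with
    | nil => simp at h
    | cons x xs => simpa using List.Perm.swap v x xs
  | succ q ih =>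
    intro l h
    cases l with
    | nil => simp at h
    | cons x xs =>
      simp at h
      have h1 := ih xs h
      exact (List.Perm.swap x (xs.getD q 0) (xs.set q v)).trans
        ((h1.cons x).trans (List.Perm.swap v x xs))

-- pvPosFold counts the strictly smaller elements of the tail
lemma pvPosFold_eq (item : Int) : ∀ (tl : List Int) (pos : Nat),
    pvPosFold tl item pos = pos + tl.countP (fun x => decide (x < item)) := by
  intro tl
  induction tl with
  | nil => intro pos; simp [pvPosFold]
  | cons x xs ih =>
    intro pos
    have h1 : pvPosFold (x :: xs) item pos = pvPosFold xs item (if x < item then pos + 1 else pos) := rfl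
    rw [h1, ih]
    by_cases h : x < item <;> simp [List.countP_cons, h] <;> omega

-- pvSkipEq finds the first index ≥ pos whose entry differs from item
lemma pvSkipEq_spec (a : List Int) (item : Int) : ∀ (fuel pos j : Nat), pos ≤ j → j < a.length →
    (∀ i, pos ≤ i → i < j → a.getD i 0 = item) → a.getD j 0 ≠ item → j - pos < fuel →
    pvSkipEq a item fuel pos = j := by
  intro fuel
  induction fuel with
  | zero => intro pos j _ _ _ _ h; omega
  | succ fuel ih =>
    intro pos j h1 h2 h3 h4 h5
    rcases Nat.eq_or_lt_of_le h1 with h | h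
    · subst h
      have hneg : ¬ (pos < a.length ∧ a.getD pos 0 = item) := fun hcl => h4 hcl.2
      have hun : pvSkipEq a item (fuel+1) pos =
          if pos < a.length ∧ a.getD pos 0 = item then pvSkipEq a item fuel (pos+1) else pos := rfl
      rw [hun, if_neg hneg]
    · have hpos : pos < a.length := by omega
      have heq : a.getD pos 0 = item := h3 pos le_rfl h
      simp only [pvSkipEq, if_pos (And.intro hpos heq)]
      exact ih (pos+1) j (by omega) h2 (fun i hi1 hi2 => h3 i (by omega) hi2) h4 (by omega)

-- characterisation of membership-below-count in a sorted list
lemma pvSorted_char (p : Int → Bool) (hmono : ∀ x y : Int, x ≤ y → p y = true → p x = true) :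
    ∀ (d : List Int), d.Pairwise (· ≤ ·) →
    ∀ i, i < d.length → (p (d.getD i 0) = true ↔ i < d.countP p) := by
  intro d
  induction d with
  | nil => intro _ i h; simp at h
  | cons x rest ih =>
    intro hd i hi
    rcases List.pairwise_cons.mp hd with ⟨hx, hrest⟩
    by_cases hpx : p x = true
    · cases i with
      | zero => simp [List.countP_cons, hpx]
      | succ i =>
        simp at hi
        have hch := ih hrest i hi
        simp only [List.getD_cons_succ, List.countP_cons, hpx, if_true]
        constructor
        · intro h; have := hch.mp h; omega
        · intro h; exact hch.mpr (by omega)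
    · have hzero : rest.countP p = 0 := by
        rw [List.countP_eq_zero]
        intro y hy hpy
        exact hpx (hmono x y (hx y hy) hpy)
      have : (x :: rest).countP p = 0 := by
        simp [List.countP_cons, hpx, hzero]
      rw [this]
      simp only [Nat.not_lt_zero, iff_false]
      cases i with
      | zero => simpa using hpx
      | succ i =>
        simp at hi
        intro hcon
        have hmem : rest.getD i 0 ∈ rest := by
          have : rest.getD i 0 = rest[i] := List.getD_eq_getElem rest 0 hi
          rw [this]; exact List.getElem_mem hi
        exact (List.countP_eq_zero.mp hzero) _ hmem (by simpa using hcon)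

-- countP (≤ item) = countP (< item) + countP (= item)
lemma pvCountP_split (item : Int) : ∀ (d : List Int),
    d.countP (fun x => decide (x ≤ item)) =
      d.countP (fun x => decide (x < item)) + d.countP (fun x => decide (x = item)) := by
  intro d
  induction d with
  | nil => simp
  | cons x xs ih =>
    by_cases hlt : x < item
    · have hle : x ≤ item := le_of_lt hlt
      have hne : x ≠ item := ne_of_lt hlt
      simp [List.countP_cons, hle, hlt, hne, ih] <;> omega
    · by_cases heq : x = item
      · have hle : x ≤ item := le_of_eq heq
        have hnlt : ¬ x < item := by rw [heq]; exact lt_irrefl _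
        simp [List.countP_cons, hle, hnlt, heq, ih] <;> omega
      · have hnle : ¬ x ≤ item := by
          rcases lt_trichotomy x item with h | h | h
          · exact absurd h hlt
          · exact absurd h heq
          · exact not_le.mpr h
        simp [List.countP_cons, hnle, hlt, heq, ih]

-- values in the equal-run of a sorted list
lemma pvSorted_run (d : List Int) (hd : d.Pairwise (· ≤ ·)) (item : Int) (i : Nat)
    (h1 : d.countP (fun x => decide (x < item)) ≤ i)
    (h2 : i < d.countP (fun x => decide (x ≤ item))) :
    d.getD i 0 = item := by
  have hlen : i < d.length := lt_of_lt_of_le h2 List.countP_le_length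
  have hle : d.getD i 0 ≤ item := by
    have := (pvSorted_char (fun x => decide (x ≤ item))
      (by intro x y hxy hy; simp at hy ⊢; exact le_trans hxy hy) d hd i hlen).mpr h2
    simpa using this
  have hnlt : ¬ d.getD i 0 < item := by
    intro hcon
    have := (pvSorted_char (fun x => decide (x < item))
      (by intro x y hxy hy; simp at hy ⊢; exact lt_of_le_of_lt hxy hy) d hd i hlen).mp
      (by simpa using hcon)
    omega
  omega

-- a window of k consecutive equal entries forces count ≥ k
lemma pvCount_window (tl : List Int) (item : Int) (q k : Nat)
    (hqk : q + k ≤ tl.length)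
    (hall : ∀ m, m < k → tl.getD (q + m) 0 = item) :
    k ≤ tl.countP (fun x => decide (x = item)) := by
  have hsub : ((tl.drop q).take k).Sublist tl :=
    ((tl.drop q).take_sublist k).trans (tl.drop_sublist q)
  have hlen : ((tl.drop q).take k).length = k := by
    simp [List.length_take, List.length_drop]; omega
  have hallmem : ∀ x ∈ (tl.drop q).take k, (fun x => decide (x = item)) x = true := by
    intro x hx
    rcases List.mem_iff_getElem.mp hx with ⟨i, hi, hgi⟩
    have hik : i < k := by omega
    have : ((tl.drop q).take k).getD i 0 = x := by
      rw [List.getD_eq_getElem _ 0 hi]; exact hgi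
    rw [pvGetD_take 0 k i (tl.drop q) hik, pvGetD_drop] at this
    have := hall i hik
    simp; omega
  have : ((tl.drop q).take k).countP (fun x => decide (x = item)) = k := by
    rw [List.countP_eq_length.mpr hallmem, hlen]
  calc k = _ := this.symm
    _ ≤ tl.countP (fun x => decide (x = item)) := hsub.countP_le

-- THE LANDING LEMMA: where one write of the rotation goes.
-- Under the rotation invariant (the held item together with the strict tail is a
-- permutation of the sorted suffix), the scan-plus-skip lands on an index p with
-- s[p] = item and a[p] ≠ item.
lemma pvLanding (s a : List Int) (c : Nat) (item : Int)
    (hs : s.Pairwise (· ≤ ·)) (hlen : a.length = s.length) (hc : c < a.length)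
    (hperm : (item :: a.drop (c+1)).Perm (s.drop c))
    (hc0 : (a.drop (c+1)).countP (fun x => decide (x < item)) = 0 → a.getD c 0 ≠ item) :
    ∃ p, c + (a.drop (c+1)).countP (fun x => decide (x < item)) ≤ p ∧ p < a.length ∧
      s.getD p 0 = item ∧ a.getD p 0 ≠ item ∧
      pvSkipEq a item (a.length + 1) (pvPosFold (a.drop (c+1)) item c) = p := by
  set tl := a.drop (c+1) with htl
  set d := s.drop c with hdd
  have hdsort : d.Pairwise (· ≤ ·) := hs.sublist (s.drop_sublist c)
  set t := tl.countP (fun x => decide (x < item)) with ht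
  have htd : d.countP (fun x => decide (x < item)) = t := by
    rw [← hperm.countP_eq, List.countP_cons, ← ht]
    simp
  set k := d.countP (fun x => decide (x = item)) with hk
  have hktl : k = tl.countP (fun x => decide (x = item)) + 1 := by
    rw [hk, ← hperm.countP_eq, List.countP_cons]
    simp
  have hu : d.countP (fun x => decide (x ≤ item)) = t + k := by
    rw [pvCountP_split, htd]
  have hdlen : d.length = s.length - c := by simp [hdd]
  have htllen : tl.length = a.length - (c+1) := by simp [htl]
  have huld : t + k ≤ d.length := hu ▸ List.countP_le_length
  have hk1 : 1 ≤ k := by omega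
  -- existence of a hole in the window [c+t, c+t+k)
  have hex : ∃ m, m < k ∧ a.getD (c + t + m) 0 ≠ item := by
    by_cases ht0 : t = 0
    · exact ⟨0, by omega, by simpa [ht0] using hc0 (by omega)⟩
    · by_contra hcon
      push_neg at hcon
      have hall : ∀ m, m < k → tl.getD ((t-1) + m) 0 = item := by
        intro m hm
        have h2 : a.getD (c + t + m) 0 = item := hcon m hm
        rw [htl, pvGetD_drop]
        have he : c + 1 + ((t-1) + m) = c + t + m := by omega
        rw [he]; exact h2
      have := pvCount_window tl item (t-1) k (by omega) hall
      omega
  -- the first such hole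
  have hexP : ∃ m, a.getD (c + t + m) 0 ≠ item := ⟨hex.choose, hex.choose_spec.2⟩
  classical
  set m0 := Nat.find hexP with hm0
  have hm0spec : a.getD (c + t + m0) 0 ≠ item := Nat.find_spec hexP
  have hm0min : ∀ m, m < m0 → a.getD (c + t + m) 0 = item := fun m hm =>
    not_not.mp (Nat.find_min hexP hm)
  have hm0k : m0 < k :=
    lt_of_le_of_lt (Nat.find_min' hexP hex.choose_spec.2) hex.choose_spec.1
  refine ⟨c + t + m0, by omega, ?_, ?_, hm0spec, ?_⟩
  · omega
  · -- s[c+t+m0] = item: it lies in the equal-run of d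
    have hge : s.getD (c + t + m0) 0 = d.getD (t + m0) 0 := by
      rw [hdd, pvGetD_drop]
      congr 1
      omega
    rw [hge]
    exact pvSorted_run d hdsort item (t + m0) (by omega) (by omega)
  · rw [pvPosFold_eq, ← ht]
    exact pvSkipEq_spec a item (a.length + 1) (c + t) (c + t + m0) (by omega) (by omega)
      (fun i hi1 hi2 => by
        have : i = c + t + (i - (c + t)) := by omega
        rw [this]; exact hm0min _ (by omega))
      hm0spec (by omega)

-- when the held item has no strictly smaller element in the strict tail,
-- it is the minimum of the suffix, i.e. the sorted value at position c
lemma pvHead_eq_of_t0 (s a : List Int) (c : Nat) (item : Int)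
    (hs : s.Pairwise (· ≤ ·)) (hc : c < s.length)
    (hperm : (item :: a.drop (c+1)).Perm (s.drop c))
    (ht0 : (a.drop (c+1)).countP (fun x => decide (x < item)) = 0) :
    s.getD c 0 = item := by
  have htd : (s.drop c).countP (fun x => decide (x < item)) = 0 := by
    rw [← hperm.countP_eq, List.countP_cons, ht0]
    simp
  have hmem : item ∈ s.drop c := hperm.mem_iff.mp (by simp)
  have hpos : 0 < (s.drop c).countP (fun x => decide (x ≤ item)) :=
    List.countP_pos_iff.mpr ⟨item, hmem, decide_eq_true (le_refl item)⟩
  have hrun : (s.drop c).getD 0 0 = item :=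
    pvSorted_run (s.drop c) (hs.sublist (s.drop_sublist c)) item 0 htd.le hpos
  have hg := pvGetD_drop s c 0
  rw [hrun] at hg
  simpa using hg.symm

-- the rotation loop exits at c with the cycle written, one write per fixed mismatch
lemma pvRotLoop_at_c (c : Nat) (f : Nat) (a : List Int) (item w : Int) :
    pvRotLoop c f a item w c = (a, w) := by
  cases f <;> simp [pvRotLoop]

lemma pvRot_spec (s : List Int) (hs : s.Pairwise (· ≤ ·)) (c : Nat) :
    ∀ (fuel : Nat) (a : List Int) (item : Int) (w : Int) (pos : Nat),
    a.length = s.length → c < a.length →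
    (item :: a.drop (c+1)).Perm (s.drop c) →
    a.getD c 0 ≠ s.getD c 0 →
    pos ≠ c →
    pvMsc a s < fuel →
    ∃ a', pvRotLoop c fuel a item w pos = (a', w + ((pvMsc a s : Int) - (pvMsc a' s : Int))) ∧
      pvMsc a' s ≤ pvMsc a s ∧
      a'.length = s.length ∧ a'.take c = a.take c ∧
      (a'.drop c).Perm (s.drop c) ∧ a'.getD c 0 = s.getD c 0 := by
  intro fuel
  induction fuel with
  | zero => intro a item w pos _ _ _ _ _ h; omega
  | succ fuel ih =>
    intro a item w pos hlen hc hperm hmis hpos hfuel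
    set t := (a.drop (c+1)).countP (fun x => decide (x < item)) with ht
    have hc0 : t = 0 → a.getD c 0 ≠ item := by
      intro ht0
      have hh := pvHead_eq_of_t0 s a c item hs (by omega) hperm (by rw [← ht]; exact ht0)
      rw [← hh]
      exact hmis
    obtain ⟨p, hpt, hplen, hsp, hap, hskip⟩ := pvLanding s a c item hs hlen hc hperm hc0
    have hmsc : pvMsc (a.set p item) s + 1 = pvMsc a s :=
      pvMsc_set item p a s hplen (by omega) hsp hap
    simp only [pvRotLoop, if_neg hpos]
    rw [hskip]
    by_cases hpc : p = c
    · subst hpc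
      rw [pvRotLoop_at_c]
      refine ⟨a.set p item, ?_, by omega, by simp [hlen], pvTake_set_ge item p p a le_rfl, ?_, ?_⟩
      · have : (pvMsc a s : Int) - (pvMsc (a.set p item) s : Int) = 1 := by omega
        rw [this]
      · rw [pvDrop_set_self item p a hc]
        exact hperm
      · rw [pvGetD_set_self item p a hc, hsp]
    · have hpc' : c < p := by omega
      have hperm' : (a.getD p 0 :: (a.set p item).drop (c+1)).Perm (s.drop c) := by
        rw [pvDrop_set_ge item (c+1) p a (by omega)]
        have h1 := pvPerm_cons_set item (p - (c+1)) (a.drop (c+1))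
          (by simp [List.length_drop]; omega)
        have h2 : (a.drop (c+1)).getD (p - (c+1)) 0 = a.getD p 0 := by
          rw [pvGetD_drop]
          congr 1; omega
        rw [h2] at h1
        exact h1.trans hperm
      obtain ⟨a', heq, hle, hl', htk, hdp, hg⟩ := ih (a.set p item) (a.getD p 0) (w+1) p
        (by simp [hlen]) (by simpa using hc) hperm'
        (by rw [pvGetD_set_ne item p c a (by omega)]; exact hmis)
        (by omega) (by omega)
      refine ⟨a', ?_, by omega, hl', ?_, hdp, hg⟩
      · rw [heq]
        congr 1
        omega
      · rw [htk, pvTake_set_ge item c p a (by omega)]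

-- invariant carried over the outer loop: sorted prefix, permuted suffix,
-- writes so far = mismatches already fixed
def pvInv (arr0 s a : List Int) (w : Int) (c : Nat) : Prop :=
  a.length = s.length ∧ a.take c = s.take c ∧ (a.drop c).Perm (s.drop c) ∧
    w + (pvMsc a s : Int) = (pvMsc arr0 s : Int)

lemma pvStep_inv (arr0 s : List Int) (hs : s.Pairwise (· ≤ ·)) (c : Nat)
    (a : List Int) (w : Int) (hc : c < s.length) (hinv : pvInv arr0 s a w c) :
    pvInv arr0 s (pvCycleStep (a, w) c).1 (pvCycleStep (a, w) c).2 (c+1) := by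
  obtain ⟨hlen, htk, hdp, hw⟩ := hinv
  have hca : c < a.length := by omega
  set item := a.getD c 0 with hitem
  set t := (a.drop (c+1)).countP (fun x => decide (x < item)) with ht
  have hconsd : a.drop c = item :: a.drop (c+1) := pvDrop_eq_getD_cons c a hca
  have hpermd : (item :: a.drop (c+1)).Perm (s.drop c) := hconsd ▸ hdp
  have hdsort : (s.drop c).Pairwise (· ≤ ·) := hs.sublist (s.drop_sublist c)
  have hsc : s.getD c 0 = (s.drop c).getD 0 0 := by
    have h := pvGetD_drop s c 0
    simpa using h.symm
  have htd : (s.drop c).countP (fun x => decide (x < item)) = t := by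
    rw [← hpermd.countP_eq, List.countP_cons, ← ht]
    simp
  by_cases ht0 : t = 0
  · -- arr[c] already minimal: no cycle, prefix extends for free
    have hpos : pvPosFold (a.drop (c+1)) item c = c := by
      rw [pvPosFold_eq, ← ht, ht0]
      omega
    have hstep : pvCycleStep (a, w) c = (a, w) := by
      simp only [pvCycleStep, ← hitem, hpos]
      simp
    rw [hstep]
    have hsc' : s.getD c 0 = item :=
      pvHead_eq_of_t0 s a c item hs hc hpermd (by rw [← ht]; exact ht0)
    refine ⟨hlen, ?_, ?_, hw⟩
    · rw [pvTake_succ_getD c a hca, pvTake_succ_getD c s (by omega), htk, ← hitem, hsc']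
    · have := hpermd
      rw [pvDrop_eq_getD_cons c s (by omega), hsc'] at this
      exact this.cons_inv
  · -- a genuine cycle: first write, then the rotation loop
    have hpos : pvPosFold (a.drop (c+1)) item c = c + t := by
      rw [pvPosFold_eq, ← ht]
    have hscne : a.getD c 0 ≠ s.getD c 0 := by
      have hlt : (s.drop c).getD 0 0 < item := by
        have hh := (pvSorted_char (fun x => decide (x < item))
          (fun x y hxy hy => by simp only [decide_eq_true_eq] at hy ⊢; exact lt_of_le_of_lt hxy hy)
          (s.drop c) hdsort 0 (by simp [List.length_drop]; omega)).mpr (by omega)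
        simpa using hh
      rw [hsc, ← hitem]
      omega
    obtain ⟨p, hpt, hplen, hsp, hap, hskip⟩ := pvLanding s a c item hs hlen hca hpermd
      (fun h => absurd h ht0)
    have hpc : c < p := by omega
    have hmsc : pvMsc (a.set p item) s + 1 = pvMsc a s :=
      pvMsc_set item p a s hplen (by omega) hsp hap
    have hperm' : (a.getD p 0 :: (a.set p item).drop (c+1)).Perm (s.drop c) := by
      rw [pvDrop_set_ge item (c+1) p a (by omega)]
      have h1 := pvPerm_cons_set item (p - (c+1)) (a.drop (c+1))
        (by simp [List.length_drop]; omega)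
      have h2 : (a.drop (c+1)).getD (p - (c+1)) 0 = a.getD p 0 := by
        rw [pvGetD_drop]; congr 1; omega
      rw [h2] at h1
      exact h1.trans hpermd
    obtain ⟨a', heq, hle, hl', htk', hdp', hg'⟩ := pvRot_spec s hs c (a.length + 1)
      (a.set p item) (a.getD p 0) (w+1) p
      (by simp [hlen]) (by simpa using hca) hperm'
      (by rw [pvGetD_set_ne item p c a (by omega)]; exact hscne)
      (by omega)
      (by have := pvMsc_le_length (a.set p item) s; simp at this; omega)
    have hstep : pvCycleStep (a, w) c = (a', (w+1) + ((pvMsc (a.set p item) s : Int) - (pvMsc a' s : Int))) := by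
      simp only [pvCycleStep, ← hitem, hpos, if_neg (by omega : ¬ c + t = c)]
      rw [hpos] at hskip
      rw [hskip]
      exact heq
    rw [hstep]
    refine ⟨hl', ?_, ?_, ?_⟩
    · rw [pvTake_succ_getD c a' (by omega), pvTake_succ_getD c s (by omega),
        htk', pvTake_set_ge item c p a (by omega), htk, hg']
    · have := hdp'
      rw [pvDrop_eq_getD_cons c a' (by omega), pvDrop_eq_getD_cons c s (by omega), hg'] at this
      exact this.cons_inv
    · push_cast
      omega

lemma pvFold_inv (arr0 s : List Int) (hs : s.Pairwise (· ≤ ·))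
    (hlen0 : arr0.length = s.length) (hp0 : arr0.Perm s) :
    ∀ k, k ≤ s.length - 1 →
    pvInv arr0 s ((List.range k).foldl pvCycleStep (arr0, 0)).1
      ((List.range k).foldl pvCycleStep (arr0, 0)).2 k := by
  intro k
  induction k with
  | zero =>
    intro _
    simp only [List.range_zero, List.foldl_nil]
    exact ⟨hlen0, by simp, by simpa using hp0, by simp⟩
  | succ k ih =>
    intro h
    have hk := ih (by omega)
    rw [List.range_succ, List.foldl_append]
    simp only [List.foldl_cons, List.foldl_nil]
    have := pvStep_inv arr0 s hs k
      (((List.range k).foldl pvCycleStep (arr0, 0)).1)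
      (((List.range k).foldl pvCycleStep (arr0, 0)).2)
      (by omega) hk
    simpa using this

-- ===== VERDICT (by name: the statement is the Claim_ definition above) =====
theorem cycle_sort_spec : Claim_equal_cycle_sort := by
  intro arr _
  unfold Spec_cycle_sort cycle_sort cycle_sort_alt
  show _ = (((arr.zip (PySem.List.sorted arr (fun x => x) false)).filter
      (fun p => decide (p.1 ≠ p.2))).length : Int)
  set s := PySem.List.sorted arr (fun x => x) false with hside
  have hperm : s.Perm arr := PySem.List.sorted_perm arr (fun x => x) false
  have hs : s.Pairwise (· ≤ ·) := by
    have := PySem.List.sorted_pairwise arr (fun x => x)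
    simpa using this
  have hlen0 : arr.length = s.length := hperm.length_eq.symm
  have harr : arr.length - 1 = s.length - 1 := by omega
  rw [harr]
  obtain ⟨hlen, htk, hdp, hw⟩ := pvFold_inv arr s hs hlen0 hperm.symm (s.length - 1) le_rfl
  set st := ((List.range (s.length - 1)).foldl pvCycleStep (arr, 0)) with hst
  have hld : (st.1.drop (s.length - 1)).length ≤ 1 := by
    simp only [List.length_drop, hlen]
    omega
  have hdrop : st.1.drop (s.length - 1) = s.drop (s.length - 1) := by
    rcases h : st.1.drop (s.length - 1) with _ | ⟨x, _ | ⟨y, xs⟩⟩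
    · rw [h] at hdp
      exact hdp.nil_eq
    · rw [h] at hdp
      exact (List.perm_singleton.mp hdp.symm).symm
    · rw [h] at hld
      simp at hld
  have hfinal : st.1 = s := by
    conv_lhs => rw [← List.take_append_drop (s.length - 1) st.1]
    conv_rhs => rw [← List.take_append_drop (s.length - 1) s]
    rw [htk, hdrop]
  have hmsc0 : pvMsc st.1 s = 0 := by rw [hfinal]; exact pvMsc_self s
  have hw2 : st.2 = (pvMsc arr s : Int) := by
    rw [hmsc0] at hw
    simpa using hw
  rw [hw2, pvMsc_zip]
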